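-- pv_equiv track=rewrite | github.com/maccaconta/MultAgenteAWS | prepare_kb/common_utils.py | ordered_dict_from_pairs
-- ===== SOURCE A (Python) =====
-- from collections import OrderedDict
--
-- def ordered_dict_from_pairs(pairs: list[tuple[str, str]]) -> OrderedDict[str, str]:
--     data: OrderedDict[str, str] = OrderedDict()
--     for key, value in pairs:
--         value = value.strip()
--         if not value:
--             continue
--         if key in data:
--             data[key] = (data[key] + "\n\n" + value).strip()
--         else:
--             data[key] = value
--     return data
-- ===== SOURCE B (Python) =====
-- from collections import OrderedDict
--
--
-- def ordered_dict_from_pairs(pairs: list[tuple[str, str]]) -> "OrderedDict[str, str]":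
--     groups: dict[str, list[str]] = {}
--     for key, value in pairs:
--         value = value.strip()
--         if value:
--             groups.setdefault(key, []).append(value)
--     return OrderedDict((key, "\n\n".join(values)) for key, values in groups.items())
-- ===== Notes on version B (the rewrite author's own statement) =====
-- stated objective: alternative
-- what changed: Two-phase grouping: first pass collects per-key lists of stripped non-empty values (no re-strip of a growing string), second pass joins each list once with '\n\n'; A instead concatenates and re-strips the accumulated string at every duplicate key.
import Mathlib
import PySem

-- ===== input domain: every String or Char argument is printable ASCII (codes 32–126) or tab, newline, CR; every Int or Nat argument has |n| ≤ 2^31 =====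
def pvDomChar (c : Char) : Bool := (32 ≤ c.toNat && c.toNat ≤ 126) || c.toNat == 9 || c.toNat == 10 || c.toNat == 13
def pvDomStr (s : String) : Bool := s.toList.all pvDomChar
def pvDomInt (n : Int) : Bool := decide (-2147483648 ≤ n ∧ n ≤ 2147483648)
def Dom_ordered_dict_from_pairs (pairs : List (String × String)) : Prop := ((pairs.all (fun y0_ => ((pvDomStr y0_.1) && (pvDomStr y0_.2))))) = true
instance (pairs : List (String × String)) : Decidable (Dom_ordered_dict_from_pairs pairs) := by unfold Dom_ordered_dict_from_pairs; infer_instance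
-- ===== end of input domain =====

set_option maxHeartbeats 1000000


-- B replaces A's per-duplicate "concatenate and re-strip the accumulated string" with a
-- two-phase grouping: collect per-key lists of stripped non-empty values, then join each
-- list once with "\n\n" (objective: alternative algorithm; same return value).

-- ===== PORT A =====
def ordered_dict_from_pairs (pairs : List (String × String)) : List (String × String) :=
  (pairs.foldl (fun data kv =>
      let value := PySem.Str.strip kv.2
      if value == "" then data
      else if data.contains kv.1 then
        data.insert kv.1 (PySem.Str.strip (data.getD kv.1 "" ++ "\n\n" ++ value))
      else data.insert kv.1 value)
    PySem.Dict.empty).items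

-- ===== PORT B =====
def ordered_dict_from_pairs_alt (pairs : List (String × String)) : List (String × String) :=
  ((pairs.foldl (fun groups kv =>
      let value := PySem.Str.strip kv.2
      if value == "" then groups
      else groups.modify kv.1 [] (· ++ [value]))
    PySem.Dict.empty).items).map (fun kv => (kv.1, PySem.Str.join "\n\n" kv.2))

-- ===== PRECONDITION & SPEC =====
def Spec_ordered_dict_from_pairs (pairs : List (String × String)) (out : List (String × String)) : Prop := out = ordered_dict_from_pairs_alt pairs
instance (pairs : List (String × String)) (out : List (String × String)) : Decidable (Spec_ordered_dict_from_pairs pairs out) := by unfold Spec_ordered_dict_from_pairs; infer_instance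

-- ===== CLAIM (what is proved, stated in full; the proofs are below) =====
def Claim_equal_ordered_dict_from_pairs : Prop := ∀ (pairs : List (String × String)), Dom_ordered_dict_from_pairs pairs → Spec_ordered_dict_from_pairs pairs (ordered_dict_from_pairs pairs)

-- ===== LEMMAS AND PROOFS =====

-- A string is "good" if it is non-empty and already left- and right-stripped.
def pvGood (v : String) : Prop :=
  v.toList ≠ [] ∧ PySem.Chars.lstrip v.toList = v.toList ∧ PySem.Chars.rstrip v.toList = v.toList

lemma pv_dropWhile_idem (p : Char → Bool) (l : List Char) :
    List.dropWhile p (List.dropWhile p l) = List.dropWhile p l := by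
  induction l with
  | nil => simp
  | cons a t ih =>
    by_cases h : p a = true
    · simpa [h] using ih
    · simp [h]

lemma pv_lstrip_append {a : List Char} (b : List Char)
    (ha : PySem.Chars.lstrip a = a) (hne : a ≠ []) :
    PySem.Chars.lstrip (a ++ b) = a ++ b := by
  unfold PySem.Chars.lstrip at *
  rw [List.dropWhile_append, ha]
  simp [List.isEmpty_iff, hne]

lemma pv_rstrip_append (a : List Char) {b : List Char}
    (hb : PySem.Chars.rstrip b = b) (hne : b ≠ []) :
    PySem.Chars.rstrip (a ++ b) = a ++ b := by
  unfold PySem.Chars.rstrip at *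
  have hb' : List.dropWhile PySem.Chars.isspace b.reverse = b.reverse := by
    have := congrArg List.reverse hb
    simpa using this
  rw [List.reverse_append, List.dropWhile_append, hb']
  simp [List.isEmpty_iff, hne]

-- Any non-empty result of strip is good.
lemma pv_good_strip (w : String) (h : (PySem.Str.strip w).toList ≠ []) :
    pvGood (PySem.Str.strip w) := by
  refine ⟨h, ?_, ?_⟩
  · -- lstrip (rstrip (lstrip w)) = rstrip (lstrip w)
    rw [PySem.Str.toList_strip] at h ⊢
    unfold PySem.Chars.strip at h ⊢
    set y := PySem.Chars.lstrip w.toList with hy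
    have hyfix : List.dropWhile PySem.Chars.isspace y = y := by
      simpa [hy, PySem.Chars.lstrip] using pv_dropWhile_idem PySem.Chars.isspace w.toList
    -- rstrip y is a prefix of y, non-empty, so its head is y's head
    unfold PySem.Chars.rstrip at h ⊢
    unfold PySem.Chars.lstrip
    set r := (List.dropWhile PySem.Chars.isspace y.reverse).reverse with hr
    have hpre : r <+: y := by
      have hsuf := List.dropWhile_suffix (l := y.reverse) PySem.Chars.isspace
      have := List.reverse_prefix.mpr hsuf
      rw [List.reverse_reverse] at this
      rw [hr]
      exact this
    rw [List.dropWhile_eq_self_iff]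
    intro hl
    have h0y : 0 < y.length := lt_of_lt_of_le hl hpre.length_le
    have hhead : y[0] = r[0] := (List.IsPrefix.getElem hpre hl).symm
    rw [← hhead]
    exact (List.dropWhile_eq_self_iff).mp hyfix h0y
  · rw [PySem.Str.toList_strip] at h ⊢
    unfold PySem.Chars.strip PySem.Chars.rstrip at h ⊢
    simp [pv_dropWhile_idem]

lemma pv_good_append_sep {a b : List Char}
    (hal : PySem.Chars.lstrip a = a) (hane : a ≠ [])
    (hbr : PySem.Chars.rstrip b = b) (hbne : b ≠ []) (sep : List Char) :
    PySem.Chars.strip (a ++ sep ++ b) = a ++ sep ++ b := by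
  unfold PySem.Chars.strip
  rw [List.append_assoc, pv_lstrip_append (sep ++ b) hal hane, ← List.append_assoc]
  exact pv_rstrip_append _ hbr hbne

lemma pv_join_append (sep v : List Char) (vs : List (List Char)) (h : vs ≠ []) :
    PySem.Chars.join sep (vs ++ [v]) = PySem.Chars.join sep vs ++ sep ++ v := by
  induction vs with
  | nil => exact absurd rfl h
  | cons a t ih =>
    cases t with
    | nil => simp [PySem.Chars.join_cons_cons, PySem.Chars.join_singleton]
    | cons q r =>
      have := ih (by simp)
      rw [List.cons_append, PySem.Chars.join_cons_cons]
      rw [List.cons_append] at this ⊢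
      rw [PySem.Chars.join_cons_cons, this]
      simp [List.append_assoc]

lemma pv_good_join (sep : List Char) (vs : List (List Char)) (h : vs ≠ [])
    (hg : ∀ v ∈ vs, v ≠ [] ∧ PySem.Chars.lstrip v = v ∧ PySem.Chars.rstrip v = v) :
    PySem.Chars.join sep vs ≠ [] ∧
      PySem.Chars.lstrip (PySem.Chars.join sep vs) = PySem.Chars.join sep vs ∧
      PySem.Chars.rstrip (PySem.Chars.join sep vs) = PySem.Chars.join sep vs := by
  induction vs with
  | nil => exact absurd rfl h
  | cons a t ih =>
    obtain ⟨hane, hal, har⟩ := hg a (by simp)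
    cases t with
    | nil =>
      simpa [PySem.Chars.join_singleton] using ⟨hane, hal, har⟩
    | cons q r =>
      obtain ⟨hne, hl, hr⟩ := ih (by simp) (fun v hv => hg v (by simp [hv]))
      rw [PySem.Chars.join_cons_cons]
      refine ⟨by simp [hane], ?_, ?_⟩
      · rw [List.append_assoc]
        exact pv_lstrip_append _ hal hane
      · rw [List.append_assoc]
        have := pv_rstrip_append (a ++ sep) hr hne
        simpa [List.append_assoc] using this
    
-- The invariant tying A's accumulator to B's.
def pvInv (d1 : PySem.Dict String String) (d2 : PySem.Dict String (List String)) : Prop :=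
  d1.items = d2.items.map (fun kv => (kv.1, PySem.Str.join "\n\n" kv.2)) ∧
  d2.keys.Nodup ∧
  ∀ kv ∈ d2.items, kv.2 ≠ [] ∧ ∀ v ∈ kv.2, pvGood v

lemma pv_keys_eq {d1 : PySem.Dict String String} {d2 : PySem.Dict String (List String)}
    (h : d1.items = d2.items.map (fun kv => (kv.1, PySem.Str.join "\n\n" kv.2))) :
    d1.keys = d2.keys := by
  simp only [PySem.Dict.keys, h, List.map_map]
  rfl

lemma pv_step (d1 : PySem.Dict String String) (d2 : PySem.Dict String (List String))
    (kv : String × String) (hinv : pvInv d1 d2) :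
    pvInv
      (let value := PySem.Str.strip kv.2
       if value == "" then d1
       else if d1.contains kv.1 then
         d1.insert kv.1 (PySem.Str.strip (d1.getD kv.1 "" ++ "\n\n" ++ value))
       else d1.insert kv.1 value)
      (let value := PySem.Str.strip kv.2
       if value == "" then d2
       else d2.modify kv.1 [] (· ++ [value])) := by
  obtain ⟨hitems, hnd, hgood⟩ := hinv
  show pvInv
      (if (PySem.Str.strip kv.2 == "") = true then d1
       else if d1.contains kv.1 = true then
         d1.insert kv.1 (PySem.Str.strip (d1.getD kv.1 "" ++ "\n\n" ++ PySem.Str.strip kv.2))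
       else d1.insert kv.1 (PySem.Str.strip kv.2))
      (if (PySem.Str.strip kv.2 == "") = true then d2
       else d2.modify kv.1 [] (· ++ [PySem.Str.strip kv.2]))
  set value := PySem.Str.strip kv.2 with hv
  by_cases hemp : (value == "") = true
  · simpa [hemp] using ⟨hitems, hnd, hgood⟩
  · rw [if_neg hemp, if_neg hemp]
    have hvne : value.toList ≠ [] := by
      intro hnil
      apply hemp
      have : value = "" := by
        have := congrArg String.ofList hnil
        simpa using this
      simp [this]
    have hvgood : pvGood value := pv_good_strip kv.2 hvne
    have hkeys : d1.keys = d2.keys := pv_keys_eq hitems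
    have hcont : d1.contains kv.1 = d2.contains kv.1 := by
      rw [PySem.Dict.contains_eq_decide_mem_keys, PySem.Dict.contains_eq_decide_mem_keys, hkeys]
    by_cases hc : d2.contains kv.1 = true
    · -- key already present: A re-strips the concatenation, B appends to the list
      obtain ⟨vs, hvs⟩ : ∃ vs, d2.get? kv.1 = some vs := by
        have := (PySem.Dict.contains_eq_isSome_get? d2 kv.1) ▸ hc
        exact Option.isSome_iff_exists.mp this
      have hmem : (kv.1, vs) ∈ d2.items := PySem.Dict.mem_items_of_get?_eq_some d2 hvs
      obtain ⟨hvsne, hvsgood⟩ := hgood _ hmem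
      have hget2 : d2.getD kv.1 [] = vs := PySem.Dict.getD_of_get?_eq_some d2 [] hvs
      have hget1 : d1.getD kv.1 "" = PySem.Str.join "\n\n" vs := by
        have hmem1 : (kv.1, PySem.Str.join "\n\n" vs) ∈ d1.items := by
          rw [hitems]
          exact List.mem_map_of_mem hmem
        exact PySem.Dict.getD_of_mem_items d1 hmem1 (pv_keys_eq hitems ▸ hnd) ""
      -- the central string identity
      have hjg := pv_good_join "\n\n".toList (vs.map String.toList)
        (by simpa using hvsne)
        (by
          intro v hvmem
          obtain ⟨w, hw, rfl⟩ := List.mem_map.mp hvmem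
          exact (hvsgood w hw))
      have hkey : PySem.Str.strip (PySem.Str.join "\n\n" vs ++ "\n\n" ++ value)
          = PySem.Str.join "\n\n" (vs ++ [value]) := by
        apply String.toList_injective
        rw [PySem.Str.toList_strip, String.toList_append, String.toList_append,
          PySem.Str.toList_join, PySem.Str.toList_join]
        have hjoin := pv_join_append "\n\n".toList value.toList (vs.map String.toList)
          (by simpa using hvsne)
        rw [List.map_append, List.map_cons, List.map_nil, hjoin]
        exact pv_good_append_sep (hjg.2.1) (hjg.1) (hvgood.2.2) hvne _
      have hc1 : d1.contains kv.1 = true := hcont ▸ hc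
      rw [if_pos hc1]
      refine ⟨?_, ?_, ?_⟩
      · -- items
        rw [PySem.Dict.modify, hget2, hget1]
        rw [PySem.Dict.items_insert_of_contains d1 _ hc1,
          PySem.Dict.items_insert_of_contains d2 _ hc]
        rw [hitems, List.map_map, List.map_map]
        apply List.map_congr_left
        intro p hp
        by_cases hpk : p.1 = kv.1
        · simp only [Function.comp_apply]
          simp [hpk, hkey]
        · simp only [Function.comp_apply]
          simp [hpk]
      · -- nodup keys: insert with contains keeps the key list
        have : (d2.modify kv.1 [] (· ++ [value])).keys = d2.keys := by
          rw [PySem.Dict.modify, PySem.Dict.keys,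
            PySem.Dict.items_insert_of_contains d2 _ hc, List.map_map]
          apply List.map_congr_left
          intro p hp
          by_cases hpk : p.1 = kv.1
          · simp [hpk]
          · simp [hpk]
        rw [this]; exact hnd
      · -- goodness of stored lists
        intro q hq
        rw [PySem.Dict.modify, hget2, PySem.Dict.items_insert_of_contains d2 _ hc] at hq
        obtain ⟨p, hpmem, hpeq⟩ := List.mem_map.mp hq
        by_cases hpk : (p.1 == kv.1) = true
        · rw [if_pos hpk] at hpeq
          subst hpeq
          refine ⟨by simp, ?_⟩
          intro v hvmem
          rcases List.mem_append.mp hvmem with h | h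
          · exact hvsgood v h
          · simp at h; subst h; exact hvgood
        · rw [if_neg hpk] at hpeq
          subst hpeq
          exact hgood p hpmem
    · -- fresh key: both append a new entry
      have hc' : d2.contains kv.1 = false := by simpa using hc
      have hc1 : d1.contains kv.1 = false := by rw [hcont]; exact hc'
      have hget2 : d2.getD kv.1 [] = [] := PySem.Dict.getD_of_not_contains d2 [] hc'
      rw [if_neg (by simp [hc1])]
      refine ⟨?_, ?_, ?_⟩
      · rw [PySem.Dict.modify, hget2]
        rw [PySem.Dict.items_insert_of_not_contains d1 _ hc1,
          PySem.Dict.items_insert_of_not_contains d2 _ hc']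
        rw [hitems, List.map_append]
        congr 1
        simp only [List.nil_append, List.map_cons, List.map_nil]
        have : PySem.Str.join "\n\n" [value] = value := by
          apply String.toList_injective
          rw [PySem.Str.toList_join]
          simp [PySem.Chars.join_singleton]
        rw [this]
      · rw [PySem.Dict.modify, hget2, PySem.Dict.keys,
          PySem.Dict.items_insert_of_not_contains d2 _ hc']
        rw [List.map_append]
        simp only [List.map_cons, List.map_nil]
        rw [List.nodup_append]
        refine ⟨hnd, by simp, ?_⟩
        intro x hx y hy
        have hyk : y = kv.1 := by simpa using hy
        have hk : kv.1 ∉ d2.keys := by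
          have := PySem.Dict.contains_eq_decide_mem_keys (d := d2) (k := kv.1)
          rw [hc'] at this
          simpa using this.symm
        intro hxy
        exact hk (hyk ▸ hxy ▸ hx)
      · intro q hq
        rw [PySem.Dict.modify, hget2, PySem.Dict.items_insert_of_not_contains d2 _ hc'] at hq
        rcases List.mem_append.mp hq with h | h
        · exact hgood q h
        · simp at h
          subst h
          exact ⟨by simp, by intro v hv; simp at hv; subst hv; exact hvgood⟩

lemma pv_fold (pairs : List (String × String)) :
    ∀ (d1 : PySem.Dict String String) (d2 : PySem.Dict String (List String)), pvInv d1 d2 →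
    pvInv
      (pairs.foldl (fun data kv =>
        let value := PySem.Str.strip kv.2
        if value == "" then data
        else if data.contains kv.1 then
          data.insert kv.1 (PySem.Str.strip (data.getD kv.1 "" ++ "\n\n" ++ value))
        else data.insert kv.1 value) d1)
      (pairs.foldl (fun groups kv =>
        let value := PySem.Str.strip kv.2
        if value == "" then groups
        else groups.modify kv.1 [] (· ++ [value])) d2) := by
  induction pairs with
  | nil => intro d1 d2 h; simpa using h
  | cons p t ih =>
    intro d1 d2 h
    simp only [List.foldl_cons]
    exact ih _ _ (pv_step d1 d2 p h)

-- ===== VERDICT (by name: the statement is the Claim_ definition above) =====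
theorem ordered_dict_from_pairs_spec : Claim_equal_ordered_dict_from_pairs := by
  intro pairs _
  unfold Spec_ordered_dict_from_pairs ordered_dict_from_pairs ordered_dict_from_pairs_alt
  have h := pv_fold pairs PySem.Dict.empty PySem.Dict.empty
    ⟨by rfl, by constructor, by intro kv hkv; cases hkv⟩
  exact h.1
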